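-- pv_equiv track=rewrite | github.com/cyberfly-labs/noor-ai | tools/build_vector_db.py | sanitize_doc_id_component
-- ===== SOURCE A (Python) =====
-- def sanitize_doc_id_component(value: str) -> str:
--     output: list[str] = []
--     last_was_underscore = False
--     for char in value:
--         allowed = char.isalnum() or char in {"_", "-"}
--         out = char if allowed else "_"
--         if out == "_":
--             if not last_was_underscore:
--                 output.append(out)
--             last_was_underscore = True
--         else:
--             output.append(out)
--             last_was_underscore = False
--     sanitized = "".join(output).strip("_")
--     return sanitized or "doc"
-- ===== SOURCE B (Python) =====
-- import re
--
-- def sanitize_doc_id_component(value: str) -> str: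
--     mapped = "".join(c if c.isalnum() or c in {"_", "-"} else "_" for c in value)
--     sanitized = re.sub(r"_+", "_", mapped).strip("_")
--     return sanitized or "doc"
-- ===== Notes on version B (the rewrite author's own statement) =====
-- stated objective: simpler
-- what changed: Replaces the single stateful pass with its last_was_underscore flag by two stateless passes: map each disallowed char to '_', then collapse underscore runs with re.sub(r"_+", "_"), then strip('_') and the 'doc' fallback.
import Mathlib
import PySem

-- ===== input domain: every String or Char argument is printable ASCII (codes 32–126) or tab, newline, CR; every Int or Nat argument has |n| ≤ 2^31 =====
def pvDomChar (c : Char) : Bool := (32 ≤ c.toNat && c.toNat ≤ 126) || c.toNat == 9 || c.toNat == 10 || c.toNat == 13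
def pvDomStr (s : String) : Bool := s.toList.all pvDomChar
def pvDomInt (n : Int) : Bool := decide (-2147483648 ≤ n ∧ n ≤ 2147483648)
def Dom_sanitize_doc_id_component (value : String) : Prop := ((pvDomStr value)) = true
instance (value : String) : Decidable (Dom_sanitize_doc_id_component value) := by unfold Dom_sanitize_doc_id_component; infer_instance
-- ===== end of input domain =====

-- B replaces A's stateful flag pass by two stateless passes (map to '_' then collapse runs); same cost, simpler.

-- ===== PORT A =====
-- literal port of A's loop body: allowed test, out, append-unless-last, flag update
def pvStepA (st : List Char × Bool) (c : Char) : List Char × Bool :=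
  let allowed := PySem.Chars.isalnum c || c == '_' || c == '-'
  let out := if allowed then c else '_'
  if out == '_' then
    (if st.2 then st.1 else st.1 ++ [out], true)
  else
    (st.1 ++ [out], false)

def sanitize_doc_id_component (value : String) : String :=
  let st := value.toList.foldl pvStepA ([], false)
  let sanitized := PySem.Chars.stripChars st.1 ['_']
  if sanitized = [] then "doc" else String.ofList sanitized

-- ===== PORT B =====
def pvMapChar (c : Char) : Char :=
  if PySem.Chars.isalnum c || c == '_' || c == '-' then c else '_'

-- port of re.sub(r"_+", "_", ·): keep one '_' per run
def pvCollapse : List Char → List Char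
  | [] => []
  | c :: rest =>
    if c == '_' then '_' :: pvCollapse (rest.dropWhile (· == '_'))
    else c :: pvCollapse rest
termination_by l => l.length
decreasing_by
  · have := List.length_dropWhile_le (· == '_') rest
    simp; omega
  · simp

def sanitize_doc_id_component_alt (value : String) : String :=
  let mapped := value.toList.map pvMapChar
  let sanitized := PySem.Chars.stripChars (pvCollapse mapped) ['_']
  if sanitized = [] then "doc" else String.ofList sanitized

-- ===== PRECONDITION & SPEC =====
def Spec_sanitize_doc_id_component (value : String) (out : String) : Prop := out = sanitize_doc_id_component_alt value
instance (value : String) (out : String) : Decidable (Spec_sanitize_doc_id_component value out) := by unfold Spec_sanitize_doc_id_component; infer_instance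

-- ===== CLAIM (what is proved, stated in full; the proofs are below) =====
def Claim_equal_sanitize_doc_id_component : Prop := ∀ (value : String), Dom_sanitize_doc_id_component value → Spec_sanitize_doc_id_component value (sanitize_doc_id_component value)

-- ===== LEMMAS AND PROOFS =====

-- A's loop, as a structural recursion on the tail, parametrised by the flag
def pvGA : Bool → List Char → List Char
  | _, [] => []
  | last, c :: rest =>
    if pvMapChar c = '_' then (if last then pvGA true rest else '_' :: pvGA true rest)
    else pvMapChar c :: pvGA false rest

lemma pvStepA_eq (acc : List Char) (last : Bool) (c : Char) :
    pvStepA (acc, last) c =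
      if pvMapChar c = '_' then (if last then acc else acc ++ ['_'], true)
      else (acc ++ [pvMapChar c], false) := by
  show (if (pvMapChar c == '_') = true then
          (if last then acc else acc ++ [pvMapChar c], true)
        else (acc ++ [pvMapChar c], false)) = _
  by_cases hm : pvMapChar c = '_'
  · simp [hm]
  · simp [hm]

lemma pvFoldl_eq_pvGA (l : List Char) (acc : List Char) (last : Bool) :
    (l.foldl pvStepA (acc, last)).1 = acc ++ pvGA last l := by
  induction l generalizing acc last with
  | nil => simp [pvGA]
  | cons c rest ih =>
    rw [List.foldl_cons, pvStepA_eq]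
    by_cases hm : pvMapChar c = '_'
    · rw [if_pos hm]
      cases last with
      | true => simp [pvGA, hm, ih]
      | false => simp [pvGA, hm, ih]
    · rw [if_neg hm]
      simp [pvGA, hm, ih]

lemma pvGA_eq_pvCollapse (l : List Char) :
    pvGA false l = pvCollapse (l.map pvMapChar) ∧
    pvGA true l = pvCollapse ((l.map pvMapChar).dropWhile (· == '_')) := by
  induction l with
  | nil => simp [pvGA, pvCollapse]
  | cons c rest ih =>
    by_cases hm : pvMapChar c = '_'
    · constructor
      · rw [List.map_cons, hm]
        rw [show pvCollapse ('_' :: List.map pvMapChar rest)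
              = '_' :: pvCollapse ((List.map pvMapChar rest).dropWhile (· == '_')) by
            simp [pvCollapse]]
        simp [pvGA, hm, ih.2]
      · rw [List.map_cons, hm, List.dropWhile_cons_of_pos (by simp)]
        simp [pvGA, hm, ih.2]
    · have hb : (pvMapChar c == '_') = false := by simpa using hm
      constructor
      · rw [List.map_cons,
            show pvCollapse (pvMapChar c :: List.map pvMapChar rest)
              = pvMapChar c :: pvCollapse (List.map pvMapChar rest) by
            simp [pvCollapse, hb]]
        simp [pvGA, hm, ih.1]
      · rw [List.map_cons, List.dropWhile_cons_of_neg (by simp [hb]),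
            show pvCollapse (pvMapChar c :: List.map pvMapChar rest)
              = pvMapChar c :: pvCollapse (List.map pvMapChar rest) by
            simp [pvCollapse, hb]]
        simp [pvGA, hm, ih.1]

-- ===== VERDICT (by name: the statement is the Claim_ definition above) =====
theorem sanitize_doc_id_component_spec : Claim_equal_sanitize_doc_id_component := by
  intro value _
  unfold Spec_sanitize_doc_id_component sanitize_doc_id_component sanitize_doc_id_component_alt
  simp only [pvFoldl_eq_pvGA, (pvGA_eq_pvCollapse value.toList).1, List.nil_append]
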